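-- pv_equiv track=rewrite | github.com/orcca-uwo/BPAS | src/FFT/src/generate_fft_furer.py | RevBidMap
-- ===== SOURCE A (Python) =====
-- def logof(n):
-- 	l = 0
-- 	while n>1:
-- 		l=l+1
-- 		n>>=1
-- 	return l
--
-- def RevBitIncr(a,b,pow):
-- 	l = logof(pow)+1
-- 	u = logof(b)
-- 	v = u%l
-- 	c = b-(b>>v)
-- 	b=b>>v
-- 	a=a+b
-- 	if((a&c) != 0 or b==1):
-- 		return a
-- 	c = b - (b>>l)
-- 	a = a-(b<<v)
-- 	while True:
-- 		b = b>>l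
-- 		a = a+b
-- 		if( (a&c) != 0 or b ==1):
-- 			break
-- 		c = c>>l
-- 		a = a-(b<<l)
-- 	return a
--
-- def RevBidMap(THRESHOLD,pow):
-- 	RevBitMap = [k for k in range(0,THRESHOLD)]
-- 	if THRESHOLD==1:
-- 		return RevBitMap
-- 	i = 0
-- 	j = 0
-- 	while i != THRESHOLD:
-- 		RevBitMap[i] = j
-- 		i = i+1
-- 		j = RevBitIncr(j,THRESHOLD,pow)
-- 	return RevBitMap
-- ===== SOURCE B (Python) =====
-- def _rb_levels(T, p):
--     # jump table: one (cumulative offset, mask, last) triple per carry level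
--     l = p.bit_length() if p > 1 else 1
--     v = (T.bit_length() - 1) % l
--     w = T >> v
--     levels = [(w, T - w, w == 1)]
--     if w > 1:
--         off, c, w = w - (w << v) + (w >> l), w - (w >> l), w >> l
--         while True:
--             levels.append((off, c, w == 1))
--             if w == 1:
--                 break
--             off, c, w = off - (w << l) + (w >> l), c >> l, w >> l
--     return levels
--
-- def _rb_next(j, levels):
--     for off, mask, last in levels:
--         if last or (j + off) & mask:
--             return j + off
--
-- def RevBidMap(THRESHOLD, pow):
--     if THRESHOLD <= 1:
--         return list(range(THRESHOLD))
--     levels = _rb_levels(THRESHOLD, pow)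
--     out = []
--     j = 0
--     for _ in range(THRESHOLD):
--         out.append(j)
--         j = _rb_next(j, levels)
--     return out
-- ===== Notes on version B (the rewrite author's own statement) =====
-- stated objective: faster
-- what changed: B replaces the destructive carry cascade (per call: recompute logof(pow) and logof(b), then add/test/subtract while mutating a, b and c) by a jump table built once per call: one (cumulative offset, mask, last) triple per carry level, so each of the n steps is a first-match scan ending in a single addition with no shifting, subtracting or log recomputation.
import Mathlib
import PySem

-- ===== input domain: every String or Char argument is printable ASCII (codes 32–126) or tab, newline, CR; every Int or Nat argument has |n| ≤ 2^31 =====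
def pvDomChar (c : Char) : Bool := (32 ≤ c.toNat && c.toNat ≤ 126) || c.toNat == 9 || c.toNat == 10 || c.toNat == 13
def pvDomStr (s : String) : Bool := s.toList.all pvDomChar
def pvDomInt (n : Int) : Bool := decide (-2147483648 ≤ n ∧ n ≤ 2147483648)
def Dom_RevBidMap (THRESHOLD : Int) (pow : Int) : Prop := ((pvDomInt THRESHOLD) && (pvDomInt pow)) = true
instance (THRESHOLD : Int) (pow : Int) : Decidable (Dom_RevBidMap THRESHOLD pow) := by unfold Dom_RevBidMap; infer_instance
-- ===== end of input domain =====

-- B replaces A's per-step carry cascade (recomputed logs, add/test/subtract mutating a,b,c)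
-- by a jump table built once — (cumulative offset, mask, last) per level — so each step is a
-- first-match scan ending in one addition (objective: faster).

-- termination helper for the shift-halving loops (b >>= l with l ≥ 1 strictly shrinks a positive b)
theorem pv_ediv_toNat_lt (b d : Int) (hd : 2 ≤ d) (hb : 0 < b) : (b / d).toNat < b.toNat := by
  have h1 := Int.mul_ediv_add_emod b d
  have hr0 : 0 ≤ b % d := Int.emod_nonneg b (by omega)
  rcases (by omega : b / d ≤ 0 ∨ 0 < b / d) with h | h
  · omega
  · have h2 : (b / d) * 2 ≤ (b / d) * d := mul_le_mul_of_nonneg_left hd (by omega)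
    have h3 : (b / d) * d = d * (b / d) := mul_comm _ _
    omega

theorem pv_sr_toNat_lt (b : Int) (k : Nat) (hb : 0 < b) : (b >>> (k+1)).toNat < b.toNat := by
  rw [Int.shiftRight_eq_div_pow]
  refine pv_ediv_toNat_lt _ _ ?_ hb
  have h2 : (2:Nat) ≤ 2 ^ (k+1) := by
    calc (2:Nat) = 2 ^ 1 := rfl
      _ ≤ 2 ^ (k+1) := Nat.pow_le_pow_right (by omega) (by omega)
  exact_mod_cast h2

theorem pv_pos_of_sr_pos (b : Int) (k : Nat) (h : 0 < b >>> k) : 0 < b := by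
  by_contra hb
  rw [Int.shiftRight_eq_div_pow] at h
  have hd0 : (0:Int) < ((2 ^ k : Nat) : Int) := by positivity
  have h2 : b / ((2 ^ k : Nat) : Int) ≤ 0 / ((2 ^ k : Nat) : Int) :=
    Int.ediv_le_ediv hd0 (by omega)
  rw [Int.zero_ediv] at h2
  omega

-- ===== PORT A =====
-- logof: A's while-loop counter (the counter is a Nat; Python's l is the same value)
def logofA (n : Int) : Nat :=
  if h : 1 < n then 1 + logofA (n >>> (1:Nat)) else 0
termination_by n.toNat
decreasing_by simpa using pv_sr_toNat_lt n 0 (by omega)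

-- the 'while True' loop of RevBitIncr; lp+1 is Python's l (always ≥ 1).
-- The 'b' ≤ 0 branch is only a totality guard: Python loops forever there (never reached from RevBidMap).
def revLoopA (lp : Nat) (a b c : Int) : Int :=
  let b' := b >>> (lp+1)
  let a' := a + b'
  if PySem.Int.band a' c ≠ 0 ∨ b' = 1 then a'
  else
    let a'' := a' - (b' <<< (lp+1))
    if h : b' ≤ 0 then a''
    else revLoopA lp a'' b' (c >>> (lp+1))
termination_by b.toNat
decreasing_by
  exact pv_sr_toNat_lt b lp (pv_pos_of_sr_pos b (lp+1) (by omega))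

def RevBitIncrA (a b pow : Int) : Int :=
  let l := logofA pow + 1
  let u := logofA b
  let v := u % l
  let c := b - (b >>> v)
  let b1 := b >>> v
  let a1 := a + b1
  if PySem.Int.band a1 c ≠ 0 ∨ b1 = 1 then a1
  else
    let c1 := b1 - (b1 >>> l)
    let a2 := a1 - (b1 <<< v)
    revLoopA (logofA pow) a2 b1 c1

-- the 'while i != THRESHOLD' loop; the 'THRESHOLD ≤ i' branch is a totality guard
-- (for THRESHOLD < 0 Python raises IndexError on the first assignment; excluded by Pre_)
def aLoopA (THRESHOLD pow : Int) (lst : List Int) (i j : Int) : List Int :=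
  if i = THRESHOLD then lst
  else if h : THRESHOLD ≤ i then lst
  else aLoopA THRESHOLD pow (lst.set i.toNat j) (i+1) (RevBitIncrA j THRESHOLD pow)
termination_by (THRESHOLD - i).toNat
decreasing_by omega

def RevBidMap (THRESHOLD : Int) (pow : Int) : List Int :=
  let RevBitMap := PySem.List.pyRange 0 THRESHOLD 1
  if THRESHOLD = 1 then RevBitMap
  else aLoopA THRESHOLD pow RevBitMap 0 0

-- ===== PORT B =====
-- the 'while True' of _rb_levels (levels k ≥ 1); lp+1 is Python's l.
-- The 'w ≤ 0' disjunct is only a totality guard: Python's loop would not terminate there (never reached).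
def rbRest (lp : Nat) (off c w : Int) : List (Int × Int × Bool) :=
  (off, c, decide (w = 1)) ::
    (if h : w = 1 ∨ w ≤ 0 then []
     else rbRest lp (off - (w <<< (lp+1)) + (w >>> (lp+1))) (c >>> (lp+1)) (w >>> (lp+1)))
termination_by w.toNat
decreasing_by exact pv_sr_toNat_lt w lp (by omega)

-- _rb_levels: the jump table, one (cumulative offset, mask, last) triple per carry level
def rbLevels (T p : Int) : List (Int × Int × Bool) :=
  let l : Nat := if 1 < p then PySem.Int.bitLength p else 1
  let v : Nat := (PySem.Int.bitLength T - 1) % l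
  let w := T >>> v
  (w, T - w, decide (w = 1)) ::
    (if 1 < w then rbRest (l - 1) (w - (w <<< v) + (w >>> l)) (w - (w >>> l)) (w >>> l) else [])

-- _rb_next: first-match scan of the jump table; [] is unreachable (the last level has last = true)
def rbNext (j : Int) : List (Int × Int × Bool) → Int
  | [] => j
  | (off, mask, last) :: rest =>
    if last = true ∨ PySem.Int.band (j + off) mask ≠ 0 then j + off else rbNext j rest

def RevBidMap_alt (THRESHOLD : Int) (pow : Int) : List Int :=
  if THRESHOLD ≤ 1 then PySem.List.pyRange 0 THRESHOLD 1
  else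
    let levels := rbLevels THRESHOLD pow
    ((List.range THRESHOLD.toNat).foldl
      (fun s _ => (s.1 ++ [s.2], rbNext s.2 levels)) (([] : List Int), (0:Int))).1

-- ===== PRECONDITION & SPEC =====
-- Pre_ excludes exactly THRESHOLD < 0, where A raises IndexError (it assigns into an empty list).
def Pre_RevBidMap (THRESHOLD : Int) (pow : Int) : Prop := 0 ≤ THRESHOLD
instance (THRESHOLD : Int) (pow : Int) : Decidable (Pre_RevBidMap THRESHOLD pow) := by unfold Pre_RevBidMap; infer_instance
def pvWitness_RevBidMap : Int × Int := (6, 3)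

def Spec_RevBidMap (THRESHOLD : Int) (pow : Int) (out : List Int) : Prop := out = RevBidMap_alt THRESHOLD pow
instance (THRESHOLD : Int) (pow : Int) (out : List Int) : Decidable (Spec_RevBidMap THRESHOLD pow out) := by unfold Spec_RevBidMap; infer_instance

-- ===== CLAIM (what is proved, stated in full; the proofs are below) =====
def Claim_equal_RevBidMap : Prop := ∀ (THRESHOLD : Int) (pow : Int), Dom_RevBidMap THRESHOLD pow → Pre_RevBidMap THRESHOLD pow → Spec_RevBidMap THRESHOLD pow (RevBidMap THRESHOLD pow)

-- ===== LEMMAS AND PROOFS =====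

-- logof agrees with bit_length - 1 on positive input
theorem pv_logofA_bitLength (n : Int) (hn : 0 < n) : logofA n + 1 = PySem.Int.bitLength n := by
  induction n using logofA.induct with
  | case1 n h ih =>
    have hsr : n >>> (1:Nat) = n / 2 := by
      rw [Int.shiftRight_eq_div_pow]; norm_num
    have hpos : 0 < n >>> (1:Nat) := by rw [hsr]; omega
    have hfd : PySem.Int.floordiv n 2 = n >>> (1:Nat) := by
      rw [PySem.Int.floordiv_eq_ediv_of_pos (by omega : (0:Int) < 2), hsr]
    rw [logofA, dif_pos h, PySem.Int.bitLength_of_pos hn, hfd]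
    have := ih hpos
    omega
  | case2 n h =>
    have hn1 : n = 1 := by omega
    subst hn1
    rw [logofA, dif_neg (by omega : ¬ (1:Int) < 1)]
    decide

theorem pv_two_pow_logofA_le (n : Int) (hn : 0 < n) : (2:Int) ^ (logofA n) ≤ n := by
  induction n using logofA.induct with
  | case1 n h ih =>
    have hsr : n >>> (1:Nat) = n / 2 := by
      rw [Int.shiftRight_eq_div_pow]; norm_num
    have hpos : 0 < n >>> (1:Nat) := by rw [hsr]; omega
    have ih' := ih hpos
    rw [logofA, dif_pos h]
    have h2 : (2:Int) ^ (1 + logofA (n >>> (1:Nat))) = 2 * 2 ^ (logofA (n >>> (1:Nat))) := by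
      rw [pow_add, pow_one]
    rw [h2]
    have h3 : 2 * ((2:Int) ^ (logofA (n >>> (1:Nat)))) ≤ 2 * (n >>> (1:Nat)) :=
      mul_le_mul_of_nonneg_left ih' (by omega)
    rw [hsr] at h3
    omega
  | case2 n h =>
    rw [logofA, dif_neg h]
    simpa using hn

theorem pv_lt_two_pow_logofA (n : Int) (hn : 0 < n) : n < (2:Int) ^ (logofA n + 1) := by
  induction n using logofA.induct with
  | case1 n h ih =>
    have hsr : n >>> (1:Nat) = n / 2 := by
      rw [Int.shiftRight_eq_div_pow]; norm_num
    have hpos : 0 < n >>> (1:Nat) := by rw [hsr]; omega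
    have ih' := ih hpos
    rw [logofA, dif_pos h]
    have h2 : (2:Int) ^ (1 + logofA (n >>> (1:Nat)) + 1) = 2 * 2 ^ (logofA (n >>> (1:Nat)) + 1) := by
      rw [pow_add, pow_add, pow_one]; ring
    rw [h2]
    have h3 : 2 * ((n >>> (1:Nat)) + 1) ≤ 2 * ((2:Int) ^ (logofA (n >>> (1:Nat)) + 1)) :=
      mul_le_mul_of_nonneg_left (by omega) (by omega)
    rw [hsr] at *
    omega
  | case2 n h =>
    rw [logofA, dif_neg h]
    omega

-- composing right shifts
theorem pv_shift_shift (x : Int) (a b : Nat) : (x >>> a) >>> b = x >>> (a + b) := by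
  rw [Int.shiftRight_eq_div_pow, Int.shiftRight_eq_div_pow, Int.shiftRight_eq_div_pow]
  rw [Int.ediv_ediv_of_nonneg (by positivity : (0:Int) ≤ ((2 ^ a : Nat) : Int))]
  congr 1
  push_cast
  rw [pow_add]

theorem pv_shift_nonneg (x : Int) (k : Nat) (hx : 0 ≤ x) : 0 ≤ x >>> k := by
  rw [Int.shiftRight_eq_div_pow]
  exact Int.ediv_nonneg hx (by positivity)

theorem pv_shift_le_self (x : Int) (k : Nat) (hx : 0 ≤ x) : x >>> k ≤ x := by
  rw [Int.shiftRight_eq_div_pow]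
  exact Int.ediv_le_self _ hx

-- T >> logof T = 1 for positive T
theorem pv_shift_log_eq_one (T : Int) (hT : 0 < T) : T >>> (logofA T) = 1 := by
  have h1 := pv_two_pow_logofA_le T hT
  have h2 := pv_lt_two_pow_logofA T hT
  rw [Int.shiftRight_eq_div_pow]
  have hP : ((2 ^ logofA T : Nat) : Int) = (2:Int) ^ logofA T := by push_cast; ring
  rw [hP]
  have hPpos : (0:Int) < (2:Int) ^ logofA T := by positivity
  have hq := Int.mul_ediv_add_emod T ((2:Int) ^ logofA T)
  have hr0 : 0 ≤ T % ((2:Int) ^ logofA T) := Int.emod_nonneg T (by omega)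
  have hrlt : T % ((2:Int) ^ logofA T) < (2:Int) ^ logofA T :=
    Int.emod_lt_of_pos T hPpos
  have h2' : T < 2 * (2:Int) ^ logofA T := by
    have : (2:Int) ^ (logofA T + 1) = 2 * (2:Int) ^ logofA T := by rw [pow_succ]; ring
    omega
  set q := T / ((2:Int) ^ logofA T) with hqdef
  set P := (2:Int) ^ logofA T
  -- P ≤ P*q + r < 2P with 0 ≤ r < P forces q = 1
  rcases (by omega : q ≤ 0 ∨ q = 1 ∨ 2 ≤ q) with h | h | h
  · have : P * q ≤ 0 := mul_nonpos_of_nonneg_of_nonpos (by omega) h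
    omega
  · exact h
  · have : P * 2 ≤ P * q := mul_le_mul_of_nonneg_left h (by omega)
    omega

-- a shallower shift of a positive T is at least 1
theorem pv_shift_ge_one (T : Int) (s : Nat) (hT : 0 < T) (hs : s ≤ logofA T) : 1 ≤ T >>> s := by
  have h1 : (T >>> s) >>> (logofA T - s) = T >>> (logofA T) := by
    rw [pv_shift_shift]; congr 1; omega
  rw [pv_shift_log_eq_one T hT] at h1
  have h2 := pv_shift_le_self (T >>> s) (logofA T - s) (pv_shift_nonneg T s (by omega))
  omega

-- A's carry cascade from level k ≥ 1 IS the first-match scan of B's remaining jump table.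
-- d counts the remaining levels below s (s + d*l = logof T), a is the running value, j the start value.
theorem pv_cascade_eq (lp : Nat) (T : Int) (hT : 2 ≤ T) :
    ∀ (d : Nat), 1 ≤ d → ∀ (s : Nat), s + d * (lp+1) = logofA T → ∀ (a j c : Int),
      revLoopA lp a (T >>> s) c =
        rbNext j (rbRest lp (a + (T >>> (s + (lp+1))) - j) c (T >>> (s + (lp+1)))) := by
  intro d
  induction d with
  | zero => omega
  | succ d ih =>
    intro _ s hs a j c
    have hs' : s + (lp+1) + d * (lp+1) = logofA T := by
      rw [← hs, Nat.succ_mul]; ring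
    have hb' : (T >>> s) >>> (lp+1) = T >>> (s + (lp+1)) := pv_shift_shift T s (lp+1)
    have hpos : 1 ≤ T >>> (s + (lp+1)) := pv_shift_ge_one T _ (by omega) (by omega)
    set X := T >>> (s + (lp+1)) with hX
    have hj : j + (a + X - j) = a + X := by ring
    rw [revLoopA, rbRest]
    simp only [hb', rbNext, hj]
    by_cases hlast : X = 1
    · rw [if_pos (Or.inr hlast), if_pos (Or.inl (by simp [hlast]))]
    · by_cases hband : PySem.Int.band (a + X) c ≠ 0
      · rw [if_pos (Or.inl hband), if_pos (Or.inr hband)]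
      · rw [if_neg (by tauto), if_neg (by simp only [decide_eq_true_eq]; tauto)]
        rw [dif_neg (by omega : ¬ X ≤ 0), dif_neg (by omega : ¬ (X = 1 ∨ X ≤ 0))]
        have hd1 : 1 ≤ d := by
          by_contra hd0
          have hd : d = 0 := by omega
          subst hd
          have he : s + (lp+1) = logofA T := by omega
          rw [hX, he, pv_shift_log_eq_one T (by omega)] at hlast
          exact hlast rfl
        have hXs : X >>> (lp+1) = T >>> (s + (lp+1) + (lp+1)) := by
          rw [hX, pv_shift_shift T _ _]
        have hrec := ih hd1 (s + (lp+1)) hs' (a + X - X <<< (lp+1)) j (c >>> (lp+1))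
        rw [← hX] at hrec
        have e1 : a + X - j - X <<< (lp+1) + X >>> (lp+1)
            = a + X - X <<< (lp+1) + X >>> (lp+1) - j := by ring
        rw [e1, hXs]
        exact hrec

-- A's reverse-bit increment IS the first-match scan of B's jump table
theorem pv_incr_eq (T p : Int) (hT : 2 ≤ T) (a : Int) :
    RevBitIncrA a T p = rbNext a (rbLevels T p) := by
  have hl : (if 1 < p then PySem.Int.bitLength p else 1) = logofA p + 1 := by
    split_ifs with h
    · exact (pv_logofA_bitLength p (by omega)).symm
    · rw [logofA, dif_neg h]
  have hu : PySem.Int.bitLength T - 1 = logofA T := by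
    have := pv_logofA_bitLength T (by omega)
    omega
  set l := logofA p + 1 with hldef
  set u := logofA T with hudef
  set v := u % l with hvdef
  have hvu : v ≤ u := Nat.mod_le _ _
  have hw1 : 1 ≤ T >>> v := pv_shift_ge_one T v (by omega) hvu
  rw [RevBitIncrA, rbLevels]
  simp only [hl, hu, ← hldef, ← hudef, ← hvdef, rbNext]
  by_cases hlast : T >>> v = 1
  · rw [if_pos (Or.inr hlast), if_pos (Or.inl (by simp [hlast]))]
  · by_cases hband : PySem.Int.band (a + T >>> v) (T - T >>> v) ≠ 0
    · rw [if_pos (Or.inl hband), if_pos (Or.inr hband)]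
    · rw [if_neg (by tauto), if_neg (by simp only [decide_eq_true_eq]; tauto)]
      rw [if_pos (by omega : 1 < T >>> v)]
      -- v < u, and l divides u - v: the cascade lemma applies with d = u / l ≥ 1
      have hvlt : v < u := by
        rcases Nat.lt_or_ge v u with h | h
        · exact h
        · have hveq : v = u := by omega
          rw [hveq, hudef, pv_shift_log_eq_one T (by omega)] at hlast
          exact absurd rfl hlast
      have hdiv : v + (u / l) * l = u := by
        have h1 := Nat.mod_add_div u l
        have h2 : l * (u / l) = (u / l) * l := Nat.mul_comm _ _
        omega
      have hd1 : 1 ≤ u / l := by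
        rcases Nat.eq_zero_or_pos (u / l) with h0 | h0
        · rw [h0] at hdiv
          simp at hdiv
          omega
        · exact h0
      have hrec := pv_cascade_eq (logofA p) T hT (u / l) hd1 v
        (by rw [← hldef, ← hudef]; exact hdiv)
        (a + T >>> v - (T >>> v) <<< v) a (T >>> v - (T >>> v) >>> l)
      rw [← hldef] at hrec
      have e0 : (T >>> v) >>> l = T >>> (v + l) := pv_shift_shift T v l
      have hll : l - 1 = logofA p := by omega
      rw [hll]
      have e1 : T >>> v - (T >>> v) <<< v + (T >>> v) >>> l
          = a + T >>> v - (T >>> v) <<< v + (T >>> v) >>> l - a := by ring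
      rw [e1, e0]
      rw [e0] at hrec
      exact hrec

-- the common generator: k values j, g j, g (g j), …
def pvGen (g : Int → Int) : Int → Nat → List Int
  | _, 0 => []
  | j, (k+1) => j :: pvGen g (g j) k

theorem pv_gen_congr (g g' : Int → Int) (h : ∀ x, g x = g' x) : ∀ k j, pvGen g j k = pvGen g' j k := by
  intro k
  induction k with
  | zero => intro j; rfl
  | succ k ih => intro j; simp [pvGen, ih, h j]

theorem pv_take_set (lst : List Int) (n : Nat) (j : Int) (h : n < lst.length) :
    (lst.set n j).take (n+1) = lst.take n ++ [j] := by
  induction lst generalizing n with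
  | nil => simp at h
  | cons x xs ih =>
    cases n with
    | zero => simp
    | succ m => simp_all [List.set, List.take]

theorem pv_aLoop_eq (T pc : Int) (k : Nat) :
    ∀ (i j : Int) (lst : List Int), 0 ≤ i → i + (k : Int) = T → lst.length = T.toNat →
      aLoopA T pc lst i j = lst.take i.toNat ++ pvGen (fun x => RevBitIncrA x T pc) j k := by
  induction k with
  | zero =>
    intro i j lst hi hik hlen
    have hiT : i = T := by omega
    rw [aLoopA, if_pos hiT, pvGen]
    rw [List.take_of_length_le (by omega)]
    simp
  | succ k ihk =>
    intro i j lst hi hik hlen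
    have hiT : i < T := by omega
    rw [aLoopA, if_neg (by omega : ¬ i = T), dif_neg (by omega : ¬ T ≤ i)]
    rw [ihk (i+1) _ _ (by omega) (by omega) (by simpa using hlen)]
    have h1 : (i+1).toNat = i.toNat + 1 := by omega
    rw [h1, pv_take_set lst i.toNat j (by omega)]
    simp [pvGen]

theorem pv_fold_eq (lv : List (Int × Int × Bool)) (ls : List Nat) :
    ∀ (acc : List Int) (j : Int),
      (ls.foldl (fun s _ => (s.1 ++ [s.2], rbNext s.2 lv)) (acc, j)).1
        = acc ++ pvGen (fun x => rbNext x lv) j ls.length := by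
  induction ls with
  | nil => intro acc j; simp [pvGen]
  | cons x xs ih => intro acc j; simp [List.foldl, ih, pvGen]

-- ===== VERDICT (by name: the statement is the Claim_ definition above) =====
theorem RevBidMap_spec : Claim_equal_RevBidMap := by
  intro T pc _ hpre
  unfold Spec_RevBidMap
  unfold Pre_RevBidMap at hpre
  rcases (by omega : T = 0 ∨ T = 1 ∨ 2 ≤ T) with h0 | h1 | hT
  · subst h0
    rw [RevBidMap, RevBidMap_alt, if_pos (by norm_num : (0:Int) ≤ 1)]
    rw [if_neg (by norm_num : ¬ (0:Int) = 1), aLoopA, if_pos rfl]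
  · subst h1
    rw [RevBidMap, RevBidMap_alt, if_pos (le_refl (1:Int)), if_pos rfl]
  · have hlen : (PySem.List.pyRange 0 T 1).length = T.toNat := by
      rw [PySem.List.length_pyRange_of_pos 0 T (by norm_num), if_pos (by omega)]
      norm_num
    rw [RevBidMap, if_neg (by omega : ¬ T = 1)]
    rw [pv_aLoop_eq T pc T.toNat 0 0 (PySem.List.pyRange 0 T 1) (le_refl 0) (by omega) hlen]
    rw [RevBidMap_alt, if_neg (by omega : ¬ T ≤ 1)]
    rw [pv_fold_eq]
    simp only [List.length_range, Int.toNat_zero, List.take_zero, List.nil_append]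
    exact pv_gen_congr _ _ (fun x => pv_incr_eq T pc hT x) T.toNat 0
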